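-- pv_equiv track=rewrite | github.com/yakobd/automaton_auditor_project_tenx | src/tools/doc_tools.py | select_relevant_chunks
-- ===== SOURCE A (Python) =====
-- def _chunk_text(text_content: str, chunk_size: int = 1000) -> list[str]:
--     return [text_content[i:i + chunk_size] for i in range(0, len(text_content), chunk_size)]
--
-- def select_relevant_chunks(text_content: str, queries: list[str], max_chunks: int = 5) -> list[str]:
--     """Simple RAG-lite retrieval: score chunks by query term overlap and return top chunks."""
--     if not text_content.strip():
--         return []
--
--     chunks = _chunk_text(text_content, chunk_size=1000)
--     normalized_queries = [query.lower().strip() for query in queries if query and query.strip()]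
--
--     if not normalized_queries:
--         return chunks[:max_chunks]
--
--     scored: list[tuple[int, str]] = []
--     for chunk in chunks:
--         lowered = chunk.lower()
--         score = sum(1 for query in normalized_queries if query in lowered)
--         if score > 0:
--             scored.append((score, chunk))
--
--     if not scored:
--         return chunks[:max_chunks]
--
--     scored.sort(key=lambda item: item[0], reverse=True)
--     return [chunk for _, chunk in scored[:max_chunks]]
-- ===== SOURCE B (Python) =====
-- def select_relevant_chunks(text_content: str, queries: list[str], max_chunks: int = 5) -> list[str]:
--     """Staged-passes variant: parallel score list, then per-score filter sweeps from the
--     highest possible score down to 1 (no sort, no scored-pair accumulator, no dict)."""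
--     if not text_content.strip():
--         return []
--
--     chunks = [text_content[i:i + 1000] for i in range(0, len(text_content), 1000)]
--
--     normalized = []
--     for query in queries:
--         if query and query.strip():
--             normalized.append(query.lower().strip())
--
--     if not normalized:
--         return chunks[:max_chunks]
--
--     scores = [sum(1 for q in normalized if q in chunk.lower()) for chunk in chunks]
--
--     ranked = [chunk
--               for s in range(len(normalized), 0, -1)
--               for chunk, sc in zip(chunks, scores) if sc == s]
--
--     if not ranked:
--         return chunks[:max_chunks]
--     return ranked[:max_chunks]
-- ===== Notes on version B (the rewrite author's own statement) =====
-- stated objective: alternative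
-- what changed: Replaces A's accumulate-(score,chunk)-pairs-then-stable-comparison-sort with staged passes: a parallel score list and one filter sweep per possible score from len(normalized) down to 1 (a counting-sort-style selection with no sort, no pair list and no append-accumulator loop); query normalization becomes an explicit loop.
import Mathlib
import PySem

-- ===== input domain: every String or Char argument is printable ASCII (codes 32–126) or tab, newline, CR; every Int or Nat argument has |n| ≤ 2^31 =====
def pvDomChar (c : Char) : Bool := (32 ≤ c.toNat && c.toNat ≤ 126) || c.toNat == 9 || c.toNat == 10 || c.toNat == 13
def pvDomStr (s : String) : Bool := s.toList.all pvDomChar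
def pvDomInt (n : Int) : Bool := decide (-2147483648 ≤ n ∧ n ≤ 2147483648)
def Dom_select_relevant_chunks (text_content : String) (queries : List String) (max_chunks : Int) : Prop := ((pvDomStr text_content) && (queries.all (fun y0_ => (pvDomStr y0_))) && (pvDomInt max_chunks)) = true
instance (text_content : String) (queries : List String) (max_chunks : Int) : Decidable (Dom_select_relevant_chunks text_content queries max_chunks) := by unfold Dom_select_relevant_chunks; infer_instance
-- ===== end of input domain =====

-- B replaces A's accumulate-(score,chunk)-pairs-then-stable-sort by staged passes: a parallel score
-- list and one filter sweep per possible score value, from the top score down to 1; same return value.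

-- ===== PORT A =====
-- A's loop body 'lowered = chunk.lower(); score = sum(...); if score > 0: scored.append(...)'
def stepA (nq : List String) (acc : List (Int × String)) (chunk : String) : List (Int × String) :=
  let lowered := PySem.Str.lower chunk
  let score : Int := (nq.countP (fun q => PySem.Str.isIn q lowered) : Int)
  if score > 0 then acc ++ [(score, chunk)] else acc

def select_relevant_chunks (text_content : String) (queries : List String) (max_chunks : Int) : List String :=
  if PySem.Str.strip text_content == "" then []
  else
    let chunks := (PySem.List.pyRange 0 (PySem.Str.len text_content) 1000).map
      (fun i => PySem.Str.slice text_content (some i) (some (i + 1000)))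
    let normalized_queries := (queries.filter (fun q => !(q == "") && !(PySem.Str.strip q == ""))).map
      (fun q => PySem.Str.strip (PySem.Str.lower q))
    if normalized_queries == [] then PySem.List.slice chunks none (some max_chunks)
    else
      let scored := chunks.foldl (stepA normalized_queries) []
      if scored == [] then PySem.List.slice chunks none (some max_chunks)
      else
        (PySem.List.slice (PySem.List.sorted scored (fun p => p.1) true) none (some max_chunks)).map
          (fun p => p.2)

-- ===== PORT B =====
-- B: explicit-loop normalization, a parallel 'scores' list, and a nested comprehension
-- '[chunk for s in range(top,0,-1) for chunk, sc in zip(chunks, scores) if sc == s]'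
def select_relevant_chunks_alt (text_content : String) (queries : List String) (max_chunks : Int) : List String :=
  if PySem.Str.strip text_content == "" then []
  else
    let chunks := (PySem.List.pyRange 0 (PySem.Str.len text_content) 1000).map
      (fun i => PySem.Str.slice text_content (some i) (some (i + 1000)))
    let normalized := queries.foldl
      (fun acc query =>
        if !(query == "") && !(PySem.Str.strip query == "")
        then acc ++ [PySem.Str.strip (PySem.Str.lower query)] else acc) []
    if normalized == [] then PySem.List.slice chunks none (some max_chunks)
    else
      let scores := chunks.map (fun chunk =>
        ((normalized.countP (fun q => PySem.Str.isIn q (PySem.Str.lower chunk))) : Int))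
      let ranked := (PySem.List.pyRange (normalized.length : Int) 0 (-1)).flatMap
        (fun s => ((chunks.zip scores).filter (fun p => p.2 == s)).map (fun p => p.1))
      if ranked == [] then PySem.List.slice chunks none (some max_chunks)
      else PySem.List.slice ranked none (some max_chunks)

-- ===== PRECONDITION & SPEC =====
def Spec_select_relevant_chunks (text_content : String) (queries : List String) (max_chunks : Int) (out : List String) : Prop := out = select_relevant_chunks_alt text_content queries max_chunks
instance (text_content : String) (queries : List String) (max_chunks : Int) (out : List String) : Decidable (Spec_select_relevant_chunks text_content queries max_chunks out) := by unfold Spec_select_relevant_chunks; infer_instance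

-- ===== CLAIM (what is proved, stated in full; the proofs are below) =====
def Claim_equal_select_relevant_chunks : Prop := ∀ (text_content : String) (queries : List String) (max_chunks : Int), Dom_select_relevant_chunks text_content queries max_chunks → Spec_select_relevant_chunks text_content queries max_chunks (select_relevant_chunks text_content queries max_chunks)

-- ===== LEMMAS AND PROOFS =====

-- the per-chunk score both versions compute
def scoreOf (nq : List String) (chunk : String) : Int :=
  (nq.countP (fun q => PySem.Str.isIn q (PySem.Str.lower chunk)) : Int)

theorem stepA_eq (nq : List String) (acc : List (Int × String)) (c : String) :
    stepA nq acc c = if scoreOf nq c > 0 then acc ++ [(scoreOf nq c, c)] else acc := rfl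

-- insertBy helpers
theorem insertBy_all_before {α : Type} (before : α → α → Bool) (x : α) (ys : List α)
    (h : ∀ y ∈ ys, before x y = true) :
    PySem.List.insertBy before x ys = x :: ys := by
  cases ys with
  | nil => rfl
  | cons y t => simp [PySem.List.insertBy, h y (by simp)]

theorem insertBy_append_not {α : Type} (before : α → α → Bool) (x : α) (A B : List α)
    (h : ∀ y ∈ A, before x y = false) :
    PySem.List.insertBy before x (A ++ B) = A ++ PySem.List.insertBy before x B := by
  induction A with
  | nil => simp
  | cons a t ih =>
      simp only [List.cons_append, PySem.List.insertBy, h a (by simp)]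
      simp only [Bool.false_eq_true, if_false, List.cons_inj_right]
      exact ih (fun y hy => h y (by simp [hy]))

-- inserting a pair into a descending-score bucket concatenation appends it to its own bucket
theorem insertBy_flatMap (r : List Int) (x : Int × String) (f : Int → List (Int × String))
    (hf : ∀ s, ∀ p ∈ f s, p.1 = s)
    (hr : r.Pairwise (· > ·)) (hx : x.1 ∈ r) :
    PySem.List.insertBy (fun a b => decide (b.1 < a.1)) x (r.flatMap f)
      = r.flatMap (fun s => f s ++ if x.1 = s then [x] else []) := by
  induction r with
  | nil => cases hx
  | cons s r' ih =>
      have hlt : ∀ s' ∈ r', s' < s := fun s' h' => (List.pairwise_cons.mp hr).1 s' h'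
      have hskip : ∀ y ∈ f s, (fun (a b : Int × String) => decide (b.1 < a.1)) x y = false := by
        intro y hy
        have hy1 := hf s y hy
        by_cases hxs : x.1 = s
        · simp [hy1, hxs]
        · have hx' : x.1 ∈ r' := by
            rcases List.mem_cons.mp hx with h | h
            · exact absurd h hxs
            · exact h
          have := hlt _ hx'
          simp [hy1]; omega
      rw [List.flatMap_cons, insertBy_append_not _ _ _ _ hskip]
      by_cases hxs : x.1 = s
      · have hall : ∀ y ∈ r'.flatMap f,
            (fun (a b : Int × String) => decide (b.1 < a.1)) x y = true := by
          intro y hy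
          rcases List.mem_flatMap.mp hy with ⟨s', hs', hy'⟩
          have := hf s' y hy'
          have := hlt s' hs'
          simp [hf s' y hy']; omega
        rw [insertBy_all_before _ _ _ hall, List.flatMap_cons, if_pos hxs]
        have heq : r'.flatMap (fun s => f s ++ if x.1 = s then [x] else []) = r'.flatMap f := by
          apply List.flatMap_congr
          intro s' hs'
          have hne : x.1 ≠ s' := fun h => absurd (hlt _ (h ▸ hs')) (by omega)
          simp [hne]
        rw [heq]; simp
      · have hx' : x.1 ∈ r' := by
          rcases List.mem_cons.mp hx with h | h
          · exact absurd h hxs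
          · exact h
        rw [ih (List.pairwise_cons.mp hr).2 hx', List.flatMap_cons, if_neg hxs]
        simp

-- stable descending sort by score = concatenation of score buckets from top down
theorem sorted_rev_eq_buckets (top : Int) (l : List (Int × String))
    (h : ∀ p ∈ l, 0 < p.1 ∧ p.1 ≤ top) :
    (PySem.List.pyRange top 0 (-1)).flatMap (fun s => l.filter (fun p => decide (p.1 = s)))
      = PySem.List.sorted l (fun p => p.1) true := by
  induction l using List.reverseRecOn with
  | nil => simp [PySem.List.sorted]
  | append_singleton l x ih =>
      have hx : x.1 ∈ PySem.List.pyRange top 0 (-1) := by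
        rw [PySem.List.mem_pyRange_neg_one]
        have := h x (by simp)
        omega
      have hr : (PySem.List.pyRange top 0 (-1)).Pairwise (· > ·) := by
        rw [PySem.List.pyRange_neg_one_eq_reverse, List.pairwise_reverse]
        exact PySem.List.pairwise_lt_pyRange_one _ _
      have hf : ∀ s : Int, ∀ p ∈ l.filter (fun p => decide (p.1 = s)), p.1 = s := by
        intro s p hp
        simpa using (List.mem_filter.mp hp).2
      rw [PySem.List.sorted_rev_eq_foldl_insertBy, List.foldl_append, List.foldl_cons,
        List.foldl_nil, ← PySem.List.sorted_rev_eq_foldl_insertBy,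
        ← ih (fun p hp => h p (by simp [hp])),
        insertBy_flatMap _ _ _ hf hr hx]
      apply List.flatMap_congr
      intro s _
      rw [List.filter_append, List.filter_singleton]
      by_cases hxs : x.1 = s <;> simp [hxs]

-- A's accumulator loop is a filter-map over the chunks
theorem foldl_stepA_eq (nq : List String) (cs : List String) :
    cs.foldl (stepA nq) []
      = (cs.filter (fun c => decide (scoreOf nq c > 0))).map (fun c => (scoreOf nq c, c)) := by
  have hfun : stepA nq = (fun acc c =>
      if (fun c => decide (scoreOf nq c > 0)) c
      then acc ++ [(fun c => (scoreOf nq c, c)) c] else acc) := by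
    funext acc c
    rw [stepA_eq]
    by_cases h : scoreOf nq c > 0 <;> simp [h]
  rw [hfun, PySem.List.foldl_append_if]
  simp

theorem map_slice_none {α β : Type} (f : α → β) (xs : List α) (m : Int) :
    (PySem.List.slice xs none (some m)).map f = PySem.List.slice (xs.map f) none (some m) := by
  simp [PySem.List.slice, List.map_take]

-- B's ranked list is exactly A's stable descending sort, projected to the chunks
theorem ranked_eq_sorted (nq : List String) (cs : List String) :
    (PySem.List.pyRange (nq.length : Int) 0 (-1)).flatMap
        (fun s => ((cs.zip (cs.map (fun c => scoreOf nq c))).filter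
          (fun p => p.2 == s)).map (fun p => p.1))
      = (PySem.List.sorted (cs.foldl (stepA nq) []) (fun p => p.1) true).map (fun p => p.2) := by
  have hz : cs.zip (cs.map (fun c => scoreOf nq c)) = cs.map (fun c => (c, scoreOf nq c)) := by
    have := List.zip_map' (f := fun c : String => c) (g := fun c => scoreOf nq c) (l := cs)
    simpa using this
  have hbounds : ∀ p ∈ cs.foldl (stepA nq) [], 0 < p.1 ∧ p.1 ≤ (nq.length : Int) := by
    rw [foldl_stepA_eq]
    intro p hp
    rcases List.mem_map.mp hp with ⟨c, hc, rfl⟩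
    have h1 : scoreOf nq c > 0 := by simpa using (List.mem_filter.mp hc).2
    have h2 : scoreOf nq c ≤ (nq.length : Int) := by
      unfold scoreOf; exact_mod_cast List.countP_le_length
    exact ⟨h1, h2⟩
  rw [← sorted_rev_eq_buckets (nq.length : Int) _ hbounds, List.map_flatMap]
  apply List.flatMap_congr
  intro s hs
  have hspos : 0 < s := (PySem.List.mem_pyRange_neg_one.mp hs).1
  rw [hz, foldl_stepA_eq, List.filter_map, List.filter_map, List.map_map, List.map_map,
    List.filter_filter]
  have hpred : ∀ c ∈ cs,
      ((fun p : String × Int => p.2 == s) ∘ fun c => (c, scoreOf nq c)) c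
        = (decide (scoreOf nq c > 0) &&
            ((fun p : Int × String => decide (p.1 = s)) ∘ fun c => (scoreOf nq c, c)) c) := by
    intro c _
    by_cases h : scoreOf nq c = s
    · simp only [Function.comp]; simp [h]; omega
    · simp only [Function.comp]; simp [h]
  rw [List.filter_congr hpred]
  simp [Function.comp, Bool.and_comm]

-- ===== VERDICT (by name: the statement is the Claim_ definition above) =====
theorem select_relevant_chunks_spec : Claim_equal_select_relevant_chunks := by
  intro t qs m _
  unfold Spec_select_relevant_chunks select_relevant_chunks select_relevant_chunks_alt
  by_cases h0 : PySem.Str.strip t == ""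
  · simp only [h0, if_pos]
  · simp only [h0, Bool.false_eq_true, if_false]
    set chunks := (PySem.List.pyRange 0 (PySem.Str.len t) 1000).map
      (fun i => PySem.Str.slice t (some i) (some (i + 1000))) with hchunks
    have hnorm : qs.foldl
        (fun acc query =>
          if !(query == "") && !(PySem.Str.strip query == "")
          then acc ++ [PySem.Str.strip (PySem.Str.lower query)] else acc) []
        = (qs.filter (fun q => !(q == "") && !(PySem.Str.strip q == ""))).map
            (fun q => PySem.Str.strip (PySem.Str.lower q)) := by
      rw [PySem.List.foldl_append_if]
      simp
    rw [hnorm]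
    set nq := (qs.filter (fun q => !(q == "") && !(PySem.Str.strip q == ""))).map
      (fun q => PySem.Str.strip (PySem.Str.lower q)) with hnq
    by_cases h1 : nq == []
    · simp only [h1, if_pos]
    · simp only [h1, Bool.false_eq_true, if_false]
      have hranked := ranked_eq_sorted nq chunks
      simp only [scoreOf] at hranked
      rw [hranked]
      set SA := chunks.foldl (stepA nq) [] with hSA
      by_cases h2 : SA == []
      · have hSAnil : SA = [] := by simpa using h2
        have : PySem.List.sorted SA (fun p : Int × String => p.1) true = [] :=
          (PySem.List.sorted_eq_nil_iff _ _ _).mpr hSAnil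
        simp only [h2, this, List.map_nil, if_pos]
        simp
      · have hSAne : SA ≠ [] := by simpa using h2
        have hsne : PySem.List.sorted SA (fun p : Int × String => p.1) true ≠ [] :=
          fun h => hSAne ((PySem.List.sorted_eq_nil_iff _ _ _).mp h)
        have hrne : ((PySem.List.sorted SA (fun p : Int × String => p.1) true).map
            (fun p => p.2) == []) = false := by
          simp [hsne]
        simp only [h2, hrne, Bool.false_eq_true, if_false]
        rw [map_slice_none]
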